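-- pv_equiv track=rewrite | github.com/symbiofafns/Sensor_Cloud_ESP32 | main.py | __am2320_check_crc
-- ===== SOURCE A (Python) =====
-- def __am2320_check_crc(data):
--     crc = 0xffff
--     for index in range(len(data)):
--         crc ^= data[index]
--         for bit in range(8):
--             result = crc & 0x0001
--             if result > 0:
--                 crc >>= 1
--                 crc ^= 0xA001
--             else:
--                 crc >>= 1
--             crc &= 0xffff
--     if crc == 0:
--         return True
--     return False
-- ===== SOURCE B (Python) =====
-- # Table-driven CRC-16/Modbus: one 256-entry table precomputed once, one table
-- # step per data byte instead of the 8-iteration bit loop.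
-- _CRC_TABLE = []
-- for _i in range(256):
--     _c = _i
--     for _bit in range(8):
--         if _c & 1:
--             _c = (_c >> 1) ^ 0xA001
--         else:
--             _c >>= 1
--         _c &= 0xFFFF
--     _CRC_TABLE.append(_c)
--
--
-- def __am2320_check_crc(data):
--     crc = 0xFFFF
--     for d in data:
--         # Python ints are unbounded; the shift-register logic only ever
--         # reads the low 17 bits of the xored value.
--         crc = (crc ^ d) & 0x1FFFF
--         crc = (crc >> 8) ^ _CRC_TABLE[crc & 0xFF]
--     return crc == 0
-- ===== Notes on version B (the rewrite author's own statement) =====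
-- stated objective: faster
-- what changed: Replaces the per-byte 8-iteration bit loop by a single lookup in a 256-entry CRC table precomputed once at module load (the xored value is masked to the 17 bits the shift register actually reads, so arbitrary int inputs behave identically).
import Mathlib
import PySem

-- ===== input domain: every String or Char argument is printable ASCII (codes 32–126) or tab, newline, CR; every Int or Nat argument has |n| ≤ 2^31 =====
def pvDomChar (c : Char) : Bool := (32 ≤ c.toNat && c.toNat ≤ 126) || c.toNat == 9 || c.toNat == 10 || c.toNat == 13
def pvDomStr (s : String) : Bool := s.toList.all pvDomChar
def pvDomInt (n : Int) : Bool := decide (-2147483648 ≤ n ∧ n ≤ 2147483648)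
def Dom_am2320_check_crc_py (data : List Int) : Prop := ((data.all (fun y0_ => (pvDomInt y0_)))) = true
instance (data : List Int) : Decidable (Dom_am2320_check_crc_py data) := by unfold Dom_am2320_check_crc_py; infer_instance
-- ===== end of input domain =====

-- B replaces A's per-byte 8-iteration bit loop by one lookup in a precomputed 256-entry CRC table (objective: faster).

-- ===== PORT A =====
def am2320_check_crc_py (data : List Int) : Bool :=
  let crc : Int :=
    (PySem.List.pyRange 0 (PySem.List.len data)).foldl
      (fun crc index =>
        let crc := PySem.Int.bxor crc (PySem.List.pyGetD data index 0)
        (PySem.List.pyRange 0 8).foldl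
          (fun crc _bit =>
            let result := PySem.Int.band crc 1
            let crc := if result > 0 then PySem.Int.bxor (crc >>> (1 : Nat)) 0xA001
                       else crc >>> (1 : Nat)
            PySem.Int.band crc 0xffff) crc) 0xffff
  if crc = 0 then true else false

-- ===== PORT B =====
-- table entry: the 8-shift polynomial loop applied to one starting value
def pvCrcEntry (i : Int) : Int :=
  (PySem.List.pyRange 0 8).foldl
    (fun c _bit =>
      let c := if PySem.Int.band c 1 ≠ 0 then PySem.Int.bxor (c >>> (1 : Nat)) 0xA001
               else c >>> (1 : Nat)
      PySem.Int.band c 0xffff) i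

def pvCrcTable : List Int := (PySem.List.pyRange 0 256).map pvCrcEntry

def am2320_check_crc_py_alt (data : List Int) : Bool :=
  let crc : Int :=
    data.foldl
      (fun crc d =>
        let crc := PySem.Int.band (PySem.Int.bxor crc d) 0x1FFFF
        PySem.Int.bxor (crc >>> (8 : Nat)) (PySem.List.pyGetD pvCrcTable (PySem.Int.band crc 0xFF) 0))
      0xFFFF
  crc == 0

-- ===== PRECONDITION & SPEC =====
def Spec_am2320_check_crc_py (data : List Int) (out : Bool) : Prop := out = am2320_check_crc_py_alt data
instance (data : List Int) (out : Bool) : Decidable (Spec_am2320_check_crc_py data out) := by unfold Spec_am2320_check_crc_py; infer_instance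

-- ===== CLAIM (what is proved, stated in full; the proofs are below) =====
def Claim_equal_am2320_check_crc_py : Prop := ∀ (data : List Int), Dom_am2320_check_crc_py data → Spec_am2320_check_crc_py data (am2320_check_crc_py data)

-- ===== LEMMAS AND PROOFS =====

-- proof-side names for the two per-element steps
def pvInStep (crc : Int) : Int :=
  let result := PySem.Int.band crc 1
  let crc := if result > 0 then PySem.Int.bxor (crc >>> (1 : Nat)) 0xA001
             else crc >>> (1 : Nat)
  PySem.Int.band crc 0xffff

def pvInner8 (x : Int) : Int := (PySem.List.pyRange 0 8).foldl (fun c _ => pvInStep c) x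

def pvElemA (crc v : Int) : Int := pvInner8 (PySem.Int.bxor crc v)

def pvElemB (crc d : Int) : Int :=
  let y := PySem.Int.band (PySem.Int.bxor crc d) 0x1FFFF
  PySem.Int.bxor (y >>> (8 : Nat)) (PySem.List.pyGetD pvCrcTable (PySem.Int.band y 0xFF) 0)

-- Nat normal form of one inner-loop iteration
def pvF (n : Nat) : Nat := if n % 2 = 1 then (n / 2) % 65536 ^^^ 40961 else (n / 2) % 65536
def pvF8 (n : Nat) : Nat := pvF (pvF (pvF (pvF (pvF (pvF (pvF (pvF n)))))))

theorem pvXorDiv2 (a b : Nat) : (a ^^^ b) / 2 = a / 2 ^^^ b / 2 := by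
  rw [← Nat.shiftRight_one, ← Nat.shiftRight_one, ← Nat.shiftRight_one,
    Nat.shiftRight_xor_distrib]

theorem pvModXor (a b : Nat) : (a ^^^ b) % 65536 = a % 65536 ^^^ b % 65536 := by
  have h : (65535 : Nat) = 2 ^ 16 - 1 := by norm_num
  rw [← Nat.and_two_pow_sub_one_eq_mod a 16, ← Nat.and_two_pow_sub_one_eq_mod b 16,
    ← Nat.and_two_pow_sub_one_eq_mod (a ^^^ b) 16, ← h, Nat.and_xor_distrib_right]

theorem pvCompl : ∀ (k : Nat), ∀ (a : Nat), a < 2 ^ k → (2 ^ k - 1) - a = (2 ^ k - 1) ^^^ a := by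
  intro k
  induction k with
  | zero => intro a ha; interval_cases a; rfl
  | succ k ih =>
    intro a ha
    have hm : ((2 ^ (k + 1) - 1) ^^^ a) % 2 = ((2 ^ (k + 1) - 1) + a) % 2 := Nat.xor_mod_two_eq
    have hd : ((2 ^ (k + 1) - 1) ^^^ a) / 2 = (2 ^ (k + 1) - 1) / 2 ^^^ a / 2 := pvXorDiv2 _ _
    have h2 : (2 : Nat) ^ (k + 1) = 2 * 2 ^ k := by rw [Nat.pow_succ]; ring
    have hhalf : (2 ^ (k + 1) - 1) / 2 = 2 ^ k - 1 := by
      have := Nat.one_le_two_pow (n := k); omega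
    rw [hhalf] at hd
    have ha2 : a / 2 < 2 ^ k := by omega
    have ihv := ih (a / 2) ha2
    have hfull := Nat.div_add_mod ((2 ^ (k + 1) - 1) ^^^ a) 2
    have hp : (2 ^ k : Nat) ≥ 1 := Nat.one_le_two_pow
    omega

theorem pvDisj : ∀ (k : Nat), ∀ (h l : Nat), l < 2 ^ k → (2 ^ k * h) ^^^ l = 2 ^ k * h + l := by
  intro k
  induction k with
  | zero => intro h l hl; interval_cases l; simp
  | succ k ih =>
    intro h l hl
    have hm : ((2 ^ (k + 1) * h) ^^^ l) % 2 = ((2 ^ (k + 1) * h) + l) % 2 := Nat.xor_mod_two_eq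
    have hd : ((2 ^ (k + 1) * h) ^^^ l) / 2 = (2 ^ (k + 1) * h) / 2 ^^^ l / 2 := pvXorDiv2 _ _
    have h2 : (2 : Nat) ^ (k + 1) = 2 * 2 ^ k := by rw [Nat.pow_succ]; ring
    have hgen : 2 ^ (k + 1) * h = 2 * (2 ^ k * h) := by rw [h2]; ring
    have hhalf : (2 ^ (k + 1) * h) / 2 = 2 ^ k * h := by omega
    rw [hhalf] at hd
    have ihv := ih h (l / 2) (by omega)
    have hfull := Nat.div_add_mod ((2 ^ (k + 1) * h) ^^^ l) 2
    have hp : (2 ^ k : Nat) ≥ 1 := Nat.one_le_two_pow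
    omega

theorem pvMask16 (m : Nat) : m &&& 65535 = m % 65536 := by
  have h : (65535 : Nat) = 2 ^ 16 - 1 := by norm_num
  rw [h, Nat.and_two_pow_sub_one_eq_mod]

theorem pvMask17 (m : Nat) : m &&& 131071 = m % 131072 := by
  have h : (131071 : Nat) = 2 ^ 17 - 1 := by norm_num
  rw [h, Nat.and_two_pow_sub_one_eq_mod]

theorem pvMask8 (m : Nat) : m &&& 255 = m % 256 := by
  have h : (255 : Nat) = 2 ^ 8 - 1 := by norm_num
  rw [h, Nat.and_two_pow_sub_one_eq_mod]

theorem pvComplXor (c : Nat) (hc : c < 65536) :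
    65535 - (c ^^^ 40961) = (65535 - c) ^^^ 40961 := by
  have h16 : (65536 : Nat) = 2 ^ 16 := by norm_num
  have hx : c ^^^ 40961 < 65536 := by
    rw [h16]; exact Nat.xor_lt_two_pow (by omega) (by norm_num)
  have e1 : 65535 - (c ^^^ 40961) = 65535 ^^^ (c ^^^ 40961) := by
    have := pvCompl 16 (c ^^^ 40961) (by omega)
    norm_num at this; exact this
  have e2 : 65535 - c = 65535 ^^^ c := by
    have := pvCompl 16 c (by omega)
    norm_num at this; exact this
  rw [e1, e2, Nat.xor_assoc]

-- PySem bitwise on negSucc, unfolded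
theorem pvBandNegSucc (m P : Nat) : PySem.Int.band (Int.negSucc m) (P : Int) = ((P - (P &&& m) : Nat) : Int) := by
  have h1 : ¬ ((0 : Int) ≤ Int.negSucc m) := by simp [Int.negSucc_eq]; omega
  have h2 : (-Int.negSucc m - 1) = (m : Int) := by rw [Int.negSucc_eq]; ring
  simp only [PySem.Int.band, h1, if_false, Int.natCast_nonneg, if_true, h2,
    Int.toNat_natCast]

theorem pvBxorNegSucc (m P : Nat) : PySem.Int.bxor (Int.negSucc m) (P : Int) = Int.negSucc (m ^^^ P) := by
  have h1 : ¬ ((0 : Int) ≤ Int.negSucc m) := by simp [Int.negSucc_eq]; omega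
  have h2 : (-Int.negSucc m - 1) = (m : Int) := by rw [Int.negSucc_eq]; ring
  simp only [PySem.Int.bxor]
  rw [if_neg h1, if_pos (Int.natCast_nonneg P)]
  have h3 : (-Int.negSucc m - 1).toNat = m := by rw [h2]; exact Int.toNat_natCast m
  rw [h3, Int.toNat_natCast, Int.negSucc_eq]
  ring

theorem pvBandMask17 (x : Int) : PySem.Int.band x 131071 = x % 131072 := by
  cases x with
  | ofNat m =>
    have : ((131071 : Int)) = ((131071 : Nat) : Int) := by norm_num
    rw [Int.ofNat_eq_natCast, this, PySem.Int.band_natCast, pvMask17]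
    omega
  | negSucc m =>
    have : ((131071 : Int)) = ((131071 : Nat) : Int) := by norm_num
    rw [this, pvBandNegSucc, Nat.and_comm, pvMask17, Int.negSucc_eq]
    omega

-- the key per-iteration lemma: one A-iteration in Nat normal form
theorem pvInStep_eq (x : Int) : pvInStep x = ((pvF (x % 131072).toNat : Nat) : Int) := by
  have hP : ((40961 : Int)) = ((40961 : Nat) : Int) := by norm_num
  have h1 : ((1 : Int)) = ((1 : Nat) : Int) := by norm_num
  have h65535 : ((65535 : Int)) = ((65535 : Nat) : Int) := by norm_num
  cases x with
  | ofNat m =>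
    have hr : ((Int.ofNat m) % 131072).toNat = m % 131072 := by
      simp only [Int.ofNat_eq_natCast]; omega
    rw [hr]
    simp only [pvInStep, pvF, Int.ofNat_eq_natCast, h1, h65535, hP,
      PySem.Int.band_natCast, Nat.and_one_is_mod]
    have hs : ((m : Int)) >>> (1 : Nat) = ((m / 2 : Nat) : Int) := by
      rw [Int.shiftRight_eq_div_pow, Int.natCast_ediv]
    rw [hs]
    by_cases hm : m % 2 = 1
    · have hcond : ((m % 2 : Nat) : Int) > 0 := by omega
      rw [if_pos hcond, if_pos (by omega : m % 131072 % 2 = 1)]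
      have hsame : m % 131072 / 2 % 65536 = m / 2 % 65536 := by omega
      rw [hsame, PySem.Int.bxor_natCast, PySem.Int.band_natCast, pvMask16, pvModXor]
    · have hcond : ¬ (((m % 2 : Nat) : Int) > 0) := by omega
      rw [if_neg hcond, if_neg (by omega : ¬ (m % 131072 % 2 = 1))]
      have hsame : m % 131072 / 2 % 65536 = m / 2 % 65536 := by omega
      rw [hsame, PySem.Int.band_natCast, pvMask16]
  | negSucc m =>
    have hr : ((Int.negSucc m) % 131072).toNat = 131071 - m % 131072 := by
      rw [Int.negSucc_eq]; omega
    rw [hr]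
    simp only [pvInStep, pvF, h1, h65535, hP, pvBandNegSucc]
    have hband1 : ((1 : Nat)) &&& m = m % 2 := by rw [Nat.and_comm, Nat.and_one_is_mod]
    rw [hband1]
    have hs : (Int.negSucc m) >>> (1 : Nat) = Int.negSucc (m / 2) := by
      have := Int.negSucc_shiftRight m 1
      rw [this, Nat.shiftRight_one]
    rw [hs]
    by_cases hm : m % 2 = 0
    · have hcond : ((1 - m % 2 : Nat) : Int) > 0 := by omega
      rw [if_pos hcond, if_pos (by omega : (131071 - m % 131072) % 2 = 1)]
      rw [pvBxorNegSucc, pvBandNegSucc, Nat.and_comm, pvMask16, pvModXor]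
      have e40961 : (40961 : Nat) % 65536 = 40961 := by norm_num
      rw [e40961]
      have hc : (m / 2) % 65536 < 65536 := by omega
      have key : (65535 : Nat) - ((m / 2) % 65536 ^^^ 40961) = (65535 - (m / 2) % 65536) ^^^ 40961 :=
        pvComplXor _ hc
      have harg : (131071 - m % 131072) / 2 % 65536 = 65535 - (m / 2) % 65536 := by omega
      rw [harg, ← key]
    · have hcond : ¬ (((1 - m % 2 : Nat) : Int) > 0) := by omega
      rw [if_neg hcond, if_neg (by omega : ¬ ((131071 - m % 131072) % 2 = 1))]
      have hsame : (131071 - m % 131072) / 2 % 65536 = 65535 - m / 2 % 65536 := by omega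
      rw [hsame, pvBandNegSucc, Nat.and_comm, pvMask16]

theorem pvF_lt (n : Nat) : pvF n < 65536 := by
  unfold pvF
  split
  · have h16 : (65536 : Nat) = 2 ^ 16 := by norm_num
    rw [h16]
    exact Nat.xor_lt_two_pow (by omega) (by norm_num)
  · omega

theorem pvInner8_eq (x : Int) : pvInner8 x = ((pvF8 (x % 131072).toNat : Nat) : Int) := by
  have hrange : PySem.List.pyRange 0 8 = [0, 1, 2, 3, 4, 5, 6, 7] := by decide
  have hstep : ∀ n : Nat, n < 131072 → pvInStep ((n : Nat) : Int) = ((pvF n : Nat) : Int) := by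
    intro n hn
    rw [pvInStep_eq]
    congr 2
    omega
  have hx : pvInStep x = ((pvF (x % 131072).toNat : Nat) : Int) := pvInStep_eq x
  have hb : ∀ n : Nat, n < 131072 → pvF n < 131072 := fun n _ => by
    have := pvF_lt n; omega
  have h0 : (x % 131072).toNat < 131072 := by omega
  simp only [pvInner8, pvF8, hrange, List.foldl]
  rw [hx, hstep _ (hb _ h0), hstep _ (hb _ (hb _ h0)),
    hstep _ (hb _ (hb _ (hb _ h0))), hstep _ (hb _ (hb _ (hb _ (hb _ h0)))),
    hstep _ (hb _ (hb _ (hb _ (hb _ (hb _ h0))))),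
    hstep _ (hb _ (hb _ (hb _ (hb _ (hb _ (hb _ h0)))))),
    hstep _ (hb _ (hb _ (hb _ (hb _ (hb _ (hb _ (hb _ h0))))))) ]

theorem pvF_xor (a b : Nat) : pvF (a ^^^ b) = pvF a ^^^ pvF b := by
  unfold pvF
  rw [pvXorDiv2, pvModXor]
  have hm : (a ^^^ b) % 2 = (a + b) % 2 := Nat.xor_mod_two_eq
  rcases Nat.mod_two_eq_zero_or_one a with ha | ha <;>
    rcases Nat.mod_two_eq_zero_or_one b with hb | hb
  · rw [if_neg (by omega), if_neg (by omega), if_neg (by omega)]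
  · rw [if_pos (by omega), if_neg (by omega), if_pos (by omega)]
    simp [Nat.xor_comm, Nat.xor_left_comm]
  · rw [if_pos (by omega), if_pos (by omega), if_neg (by omega)]
    simp [Nat.xor_comm, Nat.xor_left_comm]
  · rw [if_neg (by omega), if_pos (by omega), if_pos (by omega)]
    simp [Nat.xor_comm, Nat.xor_left_comm]

theorem pvF8_xor (a b : Nat) : pvF8 (a ^^^ b) = pvF8 a ^^^ pvF8 b := by
  simp only [pvF8, pvF_xor]

set_option maxRecDepth 80000 in
theorem pvHigh (h : Nat) (hh : h < 512) : pvF8 (256 * h) = h := by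
  revert hh
  revert h
  decide

theorem pvTableLookup (l : Nat) (hl : l < 256) :
    PySem.List.pyGetD pvCrcTable ((l : Nat) : Int) 0 = ((pvF8 l : Nat) : Int) := by
  have h := PySem.List.pyGetD_map_pyRange pvCrcEntry 256 l (0 : Int) hl
  simp only [Nat.cast_ofNat] at h
  rw [pvCrcTable, h]
  have hsame : pvCrcEntry ((l : Nat) : Int) = pvInner8 ((l : Nat) : Int) := by
    have hfn : (fun (c : Int) (_bit : Int) =>
        PySem.Int.band (if PySem.Int.band c 1 ≠ 0 then PySem.Int.bxor (c >>> (1 : Nat)) 0xA001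
          else c >>> (1 : Nat)) 0xffff) = (fun (c : Int) (_ : Int) => pvInStep c) := by
      funext c _
      have hb1 : PySem.Int.band c 1 = PySem.Int.mod c 2 := PySem.Int.band_one c
      have hb2 : PySem.Int.mod c 2 = c % 2 := PySem.Int.mod_eq_emod_of_pos (by omega)
      have hge : 0 ≤ c % 2 := by omega
      have hlt : c % 2 < 2 := by omega
      simp only [pvInStep, hb1, hb2]
      by_cases hc : c % 2 = 0
      · rw [if_neg (by omega), if_neg (by omega)]
      · rw [if_pos (by omega), if_pos (by omega)]
    simp only [pvCrcEntry, pvInner8]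
    rw [hfn]
  rw [hsame, pvInner8_eq]
  have hl2 : (((l : Nat) : Int) % 131072).toNat = l := by omega
  rw [hl2]

theorem pvElem_eq (crc d : Int) : pvElemA crc d = pvElemB crc d := by
  set x := PySem.Int.bxor crc d with hxdef
  have hA : pvElemA crc d = ((pvF8 (x % 131072).toNat : Nat) : Int) := by
    rw [pvElemA, ← hxdef, pvInner8_eq]
  set r : Nat := (x % 131072).toNat with hrdef
  have hr : r < 131072 := by omega
  have hy : PySem.Int.band x 0x1FFFF = ((r : Nat) : Int) := by
    rw [pvBandMask17]; omega
  have hshift : ((r : Nat) : Int) >>> (8 : Nat) = ((r / 256 : Nat) : Int) := by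
    rw [Int.shiftRight_eq_div_pow, Int.natCast_ediv]
  have hmask8 : PySem.Int.band ((r : Nat) : Int) 0xFF = ((r % 256 : Nat) : Int) := by
    have : ((0xFF : Int)) = ((255 : Nat) : Int) := by norm_num
    rw [this, PySem.Int.band_natCast, pvMask8]
  have hB : pvElemB crc d = PySem.Int.bxor ((r / 256 : Nat) : Int) ((pvF8 (r % 256) : Nat) : Int) := by
    rw [pvElemB, ← hxdef, hy, hshift, hmask8, pvTableLookup (r % 256) (by omega)]
  rw [hA, hB, PySem.Int.bxor_natCast]
  congr 1
  have hsplit : r = 256 * (r / 256) ^^^ (r % 256) := by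
    have h8 : (256 : Nat) = 2 ^ 8 := by norm_num
    have := pvDisj 8 (r / 256) (r % 256) (by omega)
    rw [← h8] at this
    omega
  calc pvF8 r = pvF8 (256 * (r / 256) ^^^ (r % 256)) := by rw [← hsplit]
    _ = pvF8 (256 * (r / 256)) ^^^ pvF8 (r % 256) := pvF8_xor _ _
    _ = (r / 256) ^^^ pvF8 (r % 256) := by rw [pvHigh (r / 256) (by omega)]

theorem pvFoldl_eq (data : List Int) (init : Int) :
    data.foldl pvElemA init = data.foldl pvElemB init := by
  have : pvElemA = pvElemB := funext fun c => funext fun d => pvElem_eq c d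
  rw [this]

-- ===== VERDICT (by name: the statement is the Claim_ definition above) =====
theorem am2320_check_crc_py_spec : Claim_equal_am2320_check_crc_py := by
  intro data _hdom
  unfold Spec_am2320_check_crc_py am2320_check_crc_py am2320_check_crc_py_alt
  have hA : (PySem.List.pyRange 0 (PySem.List.len data)).foldl
      (fun acc j => pvElemA acc (PySem.List.pyGetD data j 0)) (0xffff : Int)
      = data.foldl pvElemA 0xffff := by
    have := PySem.List.foldl_pyRange_pyGetD data (0 : Int) pvElemA (0xffff : Int)
      (a := 0) (by omega)
    simpa using this
  show (if (PySem.List.pyRange 0 (PySem.List.len data)).foldl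
      (fun acc j => pvElemA acc (PySem.List.pyGetD data j 0)) (0xffff : Int) = 0
      then true else false)
    = (data.foldl pvElemB 0xFFFF == 0)
  rw [hA, pvFoldl_eq]
  by_cases h : data.foldl pvElemB 0xFFFF = 0
  · simp [h]
  · simp [h]
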